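-- pv_equiv track=rewrite | github.com/tania-garcia-2005/Esctructura-de-datos | Examen-Parcial-2/Ej3_lenguaje_hacker_l33t_speak.py | cambiar_a_basico
-- ===== SOURCE A (Python) =====
-- def cambiar_a_basico(frase):
--     # Mi diccionario para cambiar las vocales a lenguaje básico.
--     cambio_vocales = {
--         'a': '4',
--         'e': '3',
--         'i': '1',
--         'o': '0',
--         'u': '(_)',
--         'A': '4',
--         'E': '3',
--         'I': '1',
--         'O': '0',
--         'U': '(_)'
--     }
--     #Estas variables me guardan el texto ya convertido.
--     resultado = ""
--     # Recorre cada letra y cambia si está en el diccionario.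
--     for letra in frase:
--         resultado += cambio_vocales.get(letra, letra)  #Lo deja igual si no está en el diccionario.
--     return resultado
-- ===== SOURCE B (Python) =====
-- def _aplicar(cambios, s):
--     # Recursively apply one str.replace per (old, new) pair.
--     if not cambios:
--         return s
--     viejo, nuevo = cambios[0]
--     return _aplicar(cambios[1:], s.replace(viejo, nuevo))
--
-- def cambiar_a_basico(frase):
--     # Safe because no replacement text contains any key, so the passes are independent.
--     return _aplicar([('a', '4'), ('e', '3'), ('i', '1'), ('o', '0'), ('u', '(_)'),
--                      ('A', '4'), ('E', '3'), ('I', '1'), ('O', '0'), ('U', '(_)')],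
--                     frase)
-- ===== Notes on version B (the rewrite author's own statement) =====
-- stated objective: faster
-- what changed: Instead of A's single char-by-char Python-level pass building the result from a dict lookup per character, B recurses over a list of (old,new) pairs and applies one whole-string C-level str.replace pass per vowel; correct because no replacement text contains any key, so the passes are independent.
import Mathlib
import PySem

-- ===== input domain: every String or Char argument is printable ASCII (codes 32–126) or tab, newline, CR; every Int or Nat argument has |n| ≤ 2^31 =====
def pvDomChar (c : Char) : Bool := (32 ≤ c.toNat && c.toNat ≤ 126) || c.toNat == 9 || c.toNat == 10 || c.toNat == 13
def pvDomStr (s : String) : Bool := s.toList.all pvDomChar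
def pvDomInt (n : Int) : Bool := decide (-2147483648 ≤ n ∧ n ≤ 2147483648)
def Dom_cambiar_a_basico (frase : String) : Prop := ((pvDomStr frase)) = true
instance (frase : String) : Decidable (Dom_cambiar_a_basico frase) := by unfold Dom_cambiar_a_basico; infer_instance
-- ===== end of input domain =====

-- B replaces A's char-by-char dict-lookup pass with a recursion over (old,new) pairs applying one str.replace per vowel (alternative decomposition, same result).


-- ===== PORT A =====
-- A's dict literal (keys distinct)
def pvVocales : PySem.Dict String String :=
  ⟨[("a", "4"), ("e", "3"), ("i", "1"), ("o", "0"), ("u", "(_)"),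
    ("A", "4"), ("E", "3"), ("I", "1"), ("O", "0"), ("U", "(_)")]⟩

def cambiar_a_basico (frase : String) : String :=
  frase.toList.foldl
    (fun resultado letra =>
      resultado ++ pvVocales.getD (String.singleton letra) (String.singleton letra)) ""

-- ===== PORT B =====
-- Source B's recursive helper _aplicar
def pvAplicar : List (String × String) → String → String
  | [], s => s
  | p :: ps, s => pvAplicar ps (PySem.Str.replace s p.1 p.2)

def cambiar_a_basico_alt (frase : String) : String :=
  pvAplicar
    [("a", "4"), ("e", "3"), ("i", "1"), ("o", "0"), ("u", "(_)"),
     ("A", "4"), ("E", "3"), ("I", "1"), ("O", "0"), ("U", "(_)")]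
    frase

-- ===== PRECONDITION & SPEC =====
def Spec_cambiar_a_basico (frase : String) (out : String) : Prop := out = cambiar_a_basico_alt frase
instance (frase : String) (out : String) : Decidable (Spec_cambiar_a_basico frase out) := by unfold Spec_cambiar_a_basico; infer_instance

-- ===== CLAIM (what is proved, stated in full; the proofs are below) =====
def Claim_equal_cambiar_a_basico : Prop := ∀ (frase : String), Dom_cambiar_a_basico frase → Spec_cambiar_a_basico frase (cambiar_a_basico frase)

-- ===== LEMMAS AND PROOFS =====

-- replacing a single-char key acts pointwise
def pvSingle (k : Char) (v : List Char) (c : Char) : List Char := if c = k then v else [c]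

-- the combined pointwise mapping both programs realise
def pvF (c : Char) : List Char :=
  if c = 'a' then ['4'] else if c = 'e' then ['3'] else if c = 'i' then ['1']
  else if c = 'o' then ['0'] else if c = 'u' then ['(', '_', ')']
  else if c = 'A' then ['4'] else if c = 'E' then ['3'] else if c = 'I' then ['1']
  else if c = 'O' then ['0'] else if c = 'U' then ['(', '_', ')'] else [c]

theorem pvReplace_go_single (k : Char) (v : List Char) :
    ∀ (fuel : Nat) (l acc : List Char), l.length ≤ fuel →
      PySem.Chars.replace.go [k] v fuel l acc = acc.reverse ++ l.flatMap (pvSingle k v) := by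
  intro fuel
  induction fuel with
  | zero =>
      intro l acc h
      have : l = [] := List.length_eq_zero_iff.mp (Nat.le_zero.mp h)
      subst this; simp [PySem.Chars.replace.go]
  | succ n ih =>
      intro l acc h
      cases l with
      | nil => simp [PySem.Chars.replace.go]
      | cons c t =>
          simp only [PySem.Chars.replace.go]
          by_cases hck : c = k
          · subst hck
            have hp : List.isPrefixOf [c] (c :: t) = true := by
              simp [List.isPrefixOf]
            rw [hp]
            rw [ih _ _ (by simpa using Nat.le_of_succ_le_succ h)]
            simp [pvSingle]
          · have hp : List.isPrefixOf [k] (c :: t) = false := by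
              simp [List.isPrefixOf]
              exact fun h => hck h.symm
            rw [hp]
            simp only [Bool.false_eq_true, if_false]
            rw [ih _ _ (by simpa using Nat.le_of_succ_le_succ h)]
            simp [pvSingle, hck]

theorem pvReplace_single (k : Char) (v s : List Char) :
    PySem.Chars.replace s [k] v = s.flatMap (pvSingle k v) := by
  unfold PySem.Chars.replace
  simp only [List.isEmpty_cons, Bool.false_eq_true, if_false]
  simpa using pvReplace_go_single k v s.length s [] (le_refl _)

theorem pvAplicar_toList :
    ∀ (ps : List (String × String)) (s : String),
      (pvAplicar ps s).toList
        = ps.foldl (fun t p => PySem.Chars.replace t p.1.toList p.2.toList) s.toList := by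
  intro ps
  induction ps with
  | nil => intro s; rfl
  | cons p ps ih =>
      intro s
      simp only [pvAplicar, List.foldl_cons, ih, PySem.Str.toList_replace]

theorem pvAlt_toList (frase : String) :
    (cambiar_a_basico_alt frase).toList = frase.toList.flatMap pvF := by
  unfold cambiar_a_basico_alt
  rw [pvAplicar_toList]
  simp only [List.foldl_cons, List.foldl_nil]
  rw [show ("a" : String).toList = ['a'] from rfl, show ("4" : String).toList = ['4'] from rfl,
      show ("e" : String).toList = ['e'] from rfl, show ("3" : String).toList = ['3'] from rfl,
      show ("i" : String).toList = ['i'] from rfl, show ("1" : String).toList = ['1'] from rfl,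
      show ("o" : String).toList = ['o'] from rfl, show ("0" : String).toList = ['0'] from rfl,
      show ("u" : String).toList = ['u'] from rfl, show ("(_)" : String).toList = ['(', '_', ')'] from rfl,
      show ("A" : String).toList = ['A'] from rfl, show ("E" : String).toList = ['E'] from rfl,
      show ("I" : String).toList = ['I'] from rfl, show ("O" : String).toList = ['O'] from rfl,
      show ("U" : String).toList = ['U'] from rfl]
  simp only [pvReplace_single, List.flatMap_assoc]
  apply List.flatMap_congr
  intro c _
  by_cases h1 : c = 'a'; · subst h1; rfl
  by_cases h2 : c = 'e'; · subst h2; rfl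
  by_cases h3 : c = 'i'; · subst h3; rfl
  by_cases h4 : c = 'o'; · subst h4; rfl
  by_cases h5 : c = 'u'; · subst h5; rfl
  by_cases h6 : c = 'A'; · subst h6; rfl
  by_cases h7 : c = 'E'; · subst h7; rfl
  by_cases h8 : c = 'I'; · subst h8; rfl
  by_cases h9 : c = 'O'; · subst h9; rfl
  by_cases h10 : c = 'U'; · subst h10; rfl
  simp [pvSingle, pvF, h1, h2, h3, h4, h5, h6, h7, h8, h9, h10]

theorem pvLookup (c : Char) :
    (pvVocales.getD (String.singleton c) (String.singleton c)).toList = pvF c := by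
  by_cases h1 : c = 'a'; · subst h1; rfl
  by_cases h2 : c = 'e'; · subst h2; rfl
  by_cases h3 : c = 'i'; · subst h3; rfl
  by_cases h4 : c = 'o'; · subst h4; rfl
  by_cases h5 : c = 'u'; · subst h5; rfl
  by_cases h6 : c = 'A'; · subst h6; rfl
  by_cases h7 : c = 'E'; · subst h7; rfl
  by_cases h8 : c = 'I'; · subst h8; rfl
  by_cases h9 : c = 'O'; · subst h9; rfl
  by_cases h10 : c = 'U'; · subst h10; rfl
  have hne : ∀ t : String, t.toList ≠ [c] → (t == String.singleton c) = false := by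
    intro t ht
    apply beq_eq_false_iff_ne.mpr
    intro he
    exact ht (by rw [he]; simp [String.singleton])
  unfold pvVocales PySem.Dict.getD PySem.Dict.get?
  simp only [List.find?]
  rw [hne "a" (by simpa using fun h => h1 h.symm), hne "e" (by simpa using fun h => h2 h.symm),
      hne "i" (by simpa using fun h => h3 h.symm), hne "o" (by simpa using fun h => h4 h.symm),
      hne "u" (by simpa using fun h => h5 h.symm), hne "A" (by simpa using fun h => h6 h.symm),
      hne "E" (by simpa using fun h => h7 h.symm), hne "I" (by simpa using fun h => h8 h.symm),
      hne "O" (by simpa using fun h => h9 h.symm), hne "U" (by simpa using fun h => h10 h.symm)]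
  simp [pvF, h1, h2, h3, h4, h5, h6, h7, h8, h9, h10, String.singleton]

theorem pvA_foldl (l : List Char) :
    ∀ acc : String,
      (l.foldl (fun r c => r ++ pvVocales.getD (String.singleton c) (String.singleton c)) acc).toList
        = acc.toList ++ l.flatMap pvF := by
  induction l with
  | nil => intro acc; simp
  | cons c t ih =>
      intro acc
      simp only [List.foldl_cons, List.flatMap_cons, ih]
      simp [pvLookup]

theorem pvA_toList (frase : String) :
    (cambiar_a_basico frase).toList = frase.toList.flatMap pvF := by
  unfold cambiar_a_basico
  simpa using pvA_foldl frase.toList ""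

-- ===== VERDICT (by name: the statement is the Claim_ definition above) =====
theorem cambiar_a_basico_spec : Claim_equal_cambiar_a_basico := by
  intro frase _
  unfold Spec_cambiar_a_basico
  rw [← String.toList_inj, pvA_toList, pvAlt_toList]
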